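-- pv_equiv track=rewrite | github.com/AkashNihalani/feed_me | apps/worker/app/sync.py | _extract_mentions
-- ===== SOURCE A (Python) =====
-- def _extract_mentions(text: str) -> str:
--     if not text:
--         return ""
--     tags = []
--     seen = set()
--     for w in text.split():
--         if w.startswith("@") and len(w) > 1:
--             t = w[1:]
--             if t not in seen:
--                 seen.add(t)
--                 tags.append(t)
--     return ",".join(tags)
-- ===== SOURCE B (Python) =====
-- def _extract_mentions(text: str) -> str:
--     if not text:
--         return ""
--     out = []
--     i, n = 0, len(text)
--     while i < n:
--         if text[i].isspace():
--             i += 1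
--             continue
--         j = i
--         while j < n and not text[j].isspace():
--             j += 1
--         if text[i] == "@" and j - i > 1:
--             t = text[i + 1:j]
--             if t not in out:
--                 out.append(t)
--         i = j
--     return ",".join(out)
-- ===== Notes on version B (the rewrite author's own statement) =====
-- stated objective: alternative
-- what changed: B replaces A's text.split() word loop with a single index-based scanner over the characters (an inner while finds each word's end) and drops the auxiliary membership set, deduplicating via membership in the output list itself.
import Mathlib
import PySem

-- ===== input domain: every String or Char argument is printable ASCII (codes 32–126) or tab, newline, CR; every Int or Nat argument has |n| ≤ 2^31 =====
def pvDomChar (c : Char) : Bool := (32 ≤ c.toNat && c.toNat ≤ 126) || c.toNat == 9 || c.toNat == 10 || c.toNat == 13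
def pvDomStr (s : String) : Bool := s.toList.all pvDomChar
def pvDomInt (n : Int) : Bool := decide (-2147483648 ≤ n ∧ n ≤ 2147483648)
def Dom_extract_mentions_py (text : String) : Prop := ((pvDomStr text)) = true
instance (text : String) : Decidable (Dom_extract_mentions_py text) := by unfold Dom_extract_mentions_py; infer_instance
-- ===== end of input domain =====

-- B replaces the split()-loop with a single index-based scanner over the characters and
-- drops the auxiliary membership set, deduplicating by membership in the output list (objective: alternative).

-- ===== PORT A =====
def extract_mentions_py (text : String) : String :=
  if text = "" then ""
  else
    let st := (PySem.Str.split₀ text).foldl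
      (fun (st : List String × PySem.Set String) w =>
        if PySem.Str.startswith w "@" && decide (1 < PySem.Str.len w) then
          let t := PySem.Str.slice w (some 1) none
          if PySem.Set.contains st.2 t then st
          else (st.1 ++ [t], PySem.Set.add st.2 t)
        else st)
      ([], [])
    PySem.Str.join "," st.1

-- ===== PORT B =====
-- inner `while j < n and not text[j].isspace(): j += 1`
def altScan (cs : List Char) (j : Nat) : Nat :=
  if h : j < cs.length then
    if PySem.Chars.isspace cs[j] then j else altScan cs (j + 1)
  else j
termination_by cs.length - j

-- needed by altGo's termination (the scanner never moves backwards)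
theorem altScan_ge (cs : List Char) (j : Nat) : j ≤ altScan cs j := by
  unfold altScan
  split
  · split
    · exact le_rfl
    · exact le_trans (Nat.le_succ j) (altScan_ge cs (j + 1))
  · exact le_rfl
termination_by cs.length - j

-- outer while loop of B, state = (i, out)
def altGo (cs : List Char) (i : Nat) (out : List String) : List String :=
  if h : i < cs.length then
    if PySem.Chars.isspace cs[i] then altGo cs (i + 1) out
    else
      let j := altScan cs i
      let out' :=
        if cs[i] = '@' ∧ 1 < j - i then
          let t := String.ofList ((cs.drop (i + 1)).take (j - (i + 1)))  -- text[i+1:j]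
          if t ∈ out then out else out ++ [t]
        else out
      altGo cs j out'
  else out
termination_by cs.length - i
decreasing_by
  · omega
  · rename_i hs
    have h1 : i + 1 ≤ altScan cs i := by
      rw [altScan]
      rw [dif_pos h, if_neg hs]
      exact altScan_ge cs (i + 1)
    omega

def extract_mentions_py_alt (text : String) : String :=
  if text = "" then ""
  else PySem.Str.join "," (altGo text.toList 0 [])

-- ===== PRECONDITION & SPEC =====
def Spec_extract_mentions_py (text : String) (out : String) : Prop := out = extract_mentions_py_alt text
instance (text : String) (out : String) : Decidable (Spec_extract_mentions_py text out) := by unfold Spec_extract_mentions_py; infer_instance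

-- ===== CLAIM (what is proved, stated in full; the proofs are below) =====
def Claim_equal_extract_mentions_py : Prop := ∀ (text : String), Dom_extract_mentions_py text → Spec_extract_mentions_py text (extract_mentions_py text)

-- ===== LEMMAS AND PROOFS =====

-- common word-level step: what both programs do with one whitespace-delimited word
def wstep (out : List String) (w : List Char) : List String :=
  if w.headD ' ' = '@' ∧ 1 < w.length then
    let t := String.ofList w.tail
    if t ∈ out then out else out ++ [t]
  else out

-- reference splitter (Python str.split())
def mySplit (l : List Char) : List (List Char) :=
  match l with
  | [] => []
  | c :: rest =>
    if PySem.Chars.isspace c then mySplit rest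
    else (c :: rest.takeWhile (fun d => !PySem.Chars.isspace d)) ::
         mySplit (rest.dropWhile (fun d => !PySem.Chars.isspace d))
termination_by l.length
decreasing_by
  · simp
  · have := List.length_dropWhile_le (fun d => !PySem.Chars.isspace d) rest
    simp; omega


theorem split_go_eq (l : List Char) : ∀ (cur : List Char) (acc : List (List Char)),
    PySem.Chars.split₀.go l cur acc =
      acc.reverse ++ (if cur = [] then mySplit l
        else (cur.reverse ++ l.takeWhile (fun d => !PySem.Chars.isspace d)) ::
             mySplit (l.dropWhile (fun d => !PySem.Chars.isspace d))) := by
  induction l with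
  | nil =>
    intro cur acc
    simp only [PySem.Chars.split₀.go]
    by_cases hc : cur = []
    · simp [hc, mySplit]
    · simp [hc, List.isEmpty_iff, mySplit]
  | cons c rest ih =>
    intro cur acc
    simp only [PySem.Chars.split₀.go]
    by_cases hs : PySem.Chars.isspace c
    · rw [if_pos hs]
      by_cases hc : cur = []
      · simp only [hc, List.isEmpty_nil, ih]
        simp [mySplit, hs]
      · rw [if_neg (by simpa [List.isEmpty_iff] using hc), ih]
        simp [hc, mySplit, hs, List.takeWhile, List.dropWhile]
    · rw [if_neg (by simpa using hs), ih]
      by_cases hc : cur = [] <;>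
        simp [hc, mySplit, hs, List.takeWhile, List.dropWhile]

theorem split₀_eq_mySplit (l : List Char) : PySem.Chars.split₀ l = mySplit l := by
  have := split_go_eq l [] []
  simpa [PySem.Chars.split₀] using this

-- altScan never runs past the end
theorem altScan_le (cs : List Char) (j : Nat) (hj : j ≤ cs.length) : altScan cs j ≤ cs.length := by
  rw [altScan]
  split
  · split
    · omega
    · exact altScan_le cs (j + 1) (by omega)
  · omega
termination_by cs.length - j

-- altScan computes takeWhile/dropWhile of the suffix
theorem altScan_spec (cs : List Char) (i : Nat) :
    (cs.drop i).takeWhile (fun d => !PySem.Chars.isspace d) = (cs.drop i).take (altScan cs i - i) ∧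
    (cs.drop i).dropWhile (fun d => !PySem.Chars.isspace d) = cs.drop (altScan cs i) := by
  by_cases h : i < cs.length
  · have hdrop : cs.drop i = cs[i] :: cs.drop (i + 1) := List.drop_eq_getElem_cons h
    by_cases hs : PySem.Chars.isspace cs[i]
    · have hi : altScan cs i = i := by rw [altScan]; simp [h, hs]
      rw [hdrop, hi]
      constructor
      · simp [hs]
      · simp [hs, hdrop.symm]
    · have hi : altScan cs i = altScan cs (i + 1) := by
        conv_lhs => rw [altScan]
        simp [h, hs]
      have ih := altScan_spec cs (i + 1)
      have hge : i + 1 ≤ altScan cs (i + 1) := altScan_ge cs (i + 1)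
      rw [hdrop, hi]
      refine ⟨?_, ?_⟩
      · have hstep : altScan cs (i + 1) - i = (altScan cs (i + 1) - (i + 1)) + 1 := by omega
        rw [hstep, List.take_succ_cons, List.takeWhile_cons]
        simp [hs, ih.1]
      · rw [List.dropWhile_cons]
        simp [hs, ih.2]
  · have hi : altScan cs i = i := by rw [altScan]; simp [h]
    have hnil : cs.drop i = [] := List.drop_eq_nil_of_le (by omega)
    simp [hnil, hi]
termination_by cs.length - i
decreasing_by
  have := altScan_ge cs (i + 1)
  omega

theorem altGo_eq (cs : List Char) (i : Nat) (out : List String) :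
    altGo cs i out = (mySplit (cs.drop i)).foldl wstep out := by
  by_cases h : i < cs.length
  · have hdrop : cs.drop i = cs[i] :: cs.drop (i + 1) := List.drop_eq_getElem_cons h
    by_cases hs : PySem.Chars.isspace cs[i]
    · rw [altGo, dif_pos h, if_pos hs, altGo_eq cs (i + 1) out]
      conv_rhs => rw [hdrop]; rw [mySplit]
      rw [if_pos hs]
    · have hspec := altScan_spec cs (i + 1)
      have hi : altScan cs i = altScan cs (i + 1) := by
        conv_lhs => rw [altScan]
        simp [h, hs]
      have hge : i + 1 ≤ altScan cs (i + 1) := altScan_ge cs (i + 1)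
      have hlen : ((cs.drop (i + 1)).take (altScan cs (i + 1) - (i + 1))).length
          = altScan cs (i + 1) - (i + 1) := by
        rw [List.length_take, List.length_drop]
        by_cases h2 : i + 1 ≤ cs.length
        · have := altScan_le cs (i + 1) h2
          omega
        · have h3 : altScan cs (i + 1) = i + 1 := by rw [altScan]; simp; omega
          omega
      have hword : wstep out (cs[i] :: (cs.drop (i + 1)).takeWhile (fun d => !PySem.Chars.isspace d)) =
          (if cs[i] = '@' ∧ 1 < altScan cs i - i then
            (if String.ofList ((cs.drop (i + 1)).take (altScan cs i - (i + 1))) ∈ out then out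
             else out ++ [String.ofList ((cs.drop (i + 1)).take (altScan cs i - (i + 1)))])
          else out) := by
        unfold wstep
        rw [hspec.1, hi]
        simp only [List.headD_cons, List.tail_cons, List.length_cons, hlen]
        have hcond : (cs[i] = '@' ∧ 1 < (altScan cs (i + 1) - (i + 1)) + 1) ↔ (cs[i] = '@' ∧ 1 < altScan cs (i + 1) - i) := by
          constructor <;> rintro ⟨a, b⟩ <;> exact ⟨a, by omega⟩
        rw [if_congr hcond rfl rfl]
      have hrec := altGo_eq cs (altScan cs i)
      rw [altGo, dif_pos h, if_neg hs]
      simp only [hrec]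
      conv_rhs => rw [hdrop]; rw [mySplit]
      rw [if_neg hs, List.foldl_cons, ← hword, hspec.2, ← hi]
  · have h1 : cs.drop i = [] := List.drop_eq_nil_of_le (by omega)
    rw [altGo, dif_neg h, h1]
    simp [mySplit]
termination_by cs.length - i
decreasing_by
  · omega
  · have := altScan_ge cs (i + 1)
    have : altScan cs i = altScan cs (i + 1) := by
      conv_lhs => rw [altScan]
      simp [h, hs]
    omega

-- A's paired fold (tags, seen) collapses to the single-list fold wstep
theorem pair_fold_eq (ws : List String) (tags : List String) :
    (ws.foldl
      (fun (st : List String × PySem.Set String) w =>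
        if PySem.Str.startswith w "@" && decide (1 < PySem.Str.len w) then
          let t := PySem.Str.slice w (some 1) none
          if PySem.Set.contains st.2 t then st
          else (st.1 ++ [t], PySem.Set.add st.2 t)
        else st)
      (tags, tags)).1 = ws.foldl (fun out w => wstep out w.toList) tags := by
  induction ws generalizing tags with
  | nil => rfl
  | cons w rest ih =>
    rw [List.foldl_cons, List.foldl_cons]
    have hstep :
        (if PySem.Str.startswith w "@" && decide (1 < PySem.Str.len w) then
          let t := PySem.Str.slice w (some 1) none
          if PySem.Set.contains tags t then (tags, tags)
          else (tags ++ [t], PySem.Set.add tags t)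
        else (tags, tags)) =
        (wstep tags w.toList, wstep tags w.toList) := by
      unfold wstep
      have hat : ("@" : String).toList = ['@'] := rfl
      have hsw : (PySem.Str.startswith w "@" = true) ↔ (w.toList.headD ' ' = '@') := by
        rw [PySem.Str.startswith_eq, PySem.Chars.startswith_iff, hat]
        cases w.toList with
        | nil => simp
        | cons c cs => simp [List.cons_prefix_cons, eq_comm]
      have hlen : PySem.Str.len w = w.toList.length := by
        simp [PySem.Str.len_eq]
      have hslice : (PySem.Str.slice w (some 1) none).toList = w.toList.tail := by
        rw [PySem.Str.toList_slice]
        exact PySem.List.slice_from_one w.toList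
      have hslice' : PySem.Str.slice w (some 1) none = String.ofList w.toList.tail := by
        apply String.toList_injective
        rw [hslice, String.toList_ofList]
      by_cases hc : (w.toList.headD ' ' = '@') ∧ 1 < w.toList.length
      · rw [if_pos (by
            simp only [Bool.and_eq_true, decide_eq_true_eq, hsw, hlen]
            exact ⟨hc.1, by exact_mod_cast hc.2⟩), if_pos hc]
        simp only [hslice']
        by_cases hm : String.ofList w.toList.tail ∈ tags
        · rw [if_pos ((PySem.Set.contains_iff _ _).mpr hm), if_pos hm]
        · rw [if_neg (fun hcon => hm ((PySem.Set.contains_iff _ _).mp hcon)), if_neg hm]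
          rw [PySem.Set.add_of_not_mem hm]
      · rw [if_neg (by
            simp only [Bool.and_eq_true, decide_eq_true_eq, hsw, hlen]
            rintro ⟨h1, h2⟩
            exact hc ⟨h1, by exact_mod_cast h2⟩), if_neg hc]
    rw [hstep, ih]

theorem words_fold_eq (text : String) :
    (PySem.Str.split₀ text).foldl (fun out w => wstep out w.toList) [] =
    (mySplit text.toList).foldl wstep [] := by
  rw [← split₀_eq_mySplit, ← PySem.Str.split₀_map_toList, List.foldl_map]

-- ===== VERDICT (by name: the statement is the Claim_ definition above) =====
theorem extract_mentions_py_spec : Claim_equal_extract_mentions_py := by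
  intro text _
  unfold Spec_extract_mentions_py extract_mentions_py extract_mentions_py_alt
  by_cases ht : text = ""
  · simp [ht]
  · rw [if_neg ht, if_neg ht, altGo_eq text.toList 0 [], List.drop_zero,
      ← words_fold_eq, ← pair_fold_eq _ []]
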